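-- pv_equiv track=rewrite | github.com/opendatalab/OmniDocBench | src/core/preprocess/formula_cdm.py | _split_top_level_cells
-- ===== SOURCE A (Python) =====
-- def _split_top_level_cells(text: str, separator: str) -> list[str]:
--     parts = []
--     current = []
--     brace_depth = 0
--     env_depth = 0
--     index = 0
--     length = len(text)
--     multi_sep = separator == '\\\\'
--
--     while index < length:
--         if text.startswith('\\begin{', index):
--             end_index = text.find('}', index + len('\\begin{'))
--             if end_index != -1:
--                 current.append(text[index:end_index + 1])
--                 env_depth += 1
--                 index = end_index + 1
--                 continue
--         if text.startswith('\\end{', index):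
--             end_index = text.find('}', index + len('\\end{'))
--             if end_index != -1:
--                 current.append(text[index:end_index + 1])
--                 env_depth = max(0, env_depth - 1)
--                 index = end_index + 1
--                 continue
--
--         if multi_sep:
--             if text.startswith(separator, index) and brace_depth == 0 and env_depth == 0:
--                 parts.append(''.join(current).strip())
--                 current = []
--                 index += len(separator)
--                 continue
--         elif text[index] == separator and brace_depth == 0 and env_depth == 0:
--             parts.append(''.join(current).strip())
--             current = []
--             index += 1
--             continue
--
--         char = text[index]
--         current.append(char)
--         if char == '{':
--             brace_depth += 1
--         elif char == '}':
--             brace_depth = max(0, brace_depth - 1)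
--         index += 1
--
--     tail = ''.join(current).strip()
--     if tail:
--         parts.append(tail)
--     return parts
-- ===== SOURCE B (Python) =====
-- def _split_top_level_cells(text: str, separator: str) -> list[str]:
--     multi = separator == '\\\\'
--     step = 2 if multi else 1
--     n = len(text)
--
--     # pass 1: record only the POSITIONS of top-level separators (nothing is buffered)
--     cuts = []
--     i = bd = ed = 0
--     while i < n:
--         matched = False
--         for prefix, delta in (('\\begin{', 1), ('\\end{', -1)):
--             if text.startswith(prefix, i):
--                 j = text.find('}', i + len(prefix))
--                 if j != -1:
--                     ed = max(0, ed + delta)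
--                     i = j + 1
--                     matched = True
--                     break
--         if matched:
--             continue
--         if bd == ed == 0 and (text.startswith(separator, i) if multi else text[i] == separator):
--             cuts.append(i)
--             i += step
--         else:
--             c = text[i]
--             if c == '{':
--                 bd += 1
--             elif c == '}':
--                 bd = max(0, bd - 1)
--             i += 1
--
--     # pass 2: rebuild the parts by slicing the original string between the cuts
--     starts = [0] + [c + step for c in cuts]
--     ends = cuts + [n]
--     parts = [text[a:b].strip() for a, b in zip(starts, ends)]
--     if not parts[-1]:
--         parts.pop()
--     return parts
-- ===== Notes on version B (the rewrite author's own statement) =====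
-- stated objective: alternative
-- what changed: B replaces A's character-buffer accumulation by a two-phase algorithm: a first scan records only the integer positions of top-level separators (no text is copied during the scan), and a second pass rebuilds the parts by slicing the original string between consecutive cut positions, stripping each slice and dropping an empty final slice.
import Mathlib
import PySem

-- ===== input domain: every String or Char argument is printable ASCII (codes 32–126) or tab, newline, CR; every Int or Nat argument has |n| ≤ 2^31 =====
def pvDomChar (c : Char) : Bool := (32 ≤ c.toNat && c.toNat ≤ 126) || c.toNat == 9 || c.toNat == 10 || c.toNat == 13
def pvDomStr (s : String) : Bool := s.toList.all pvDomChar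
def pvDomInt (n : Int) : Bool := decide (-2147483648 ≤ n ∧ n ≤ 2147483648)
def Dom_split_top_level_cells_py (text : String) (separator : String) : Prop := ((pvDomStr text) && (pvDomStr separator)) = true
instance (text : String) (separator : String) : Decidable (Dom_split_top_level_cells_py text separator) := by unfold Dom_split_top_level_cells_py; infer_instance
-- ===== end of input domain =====

-- B replaces A's character-buffer accumulation by a two-phase algorithm: a first pass records
-- only the POSITIONS of top-level separators, a second pass rebuilds the parts by slicing the
-- original string between those cut positions.

-- ===== PORT A =====

-- text.find('}', i): first '}' in the suffix; returns (chars up to and including '}', rest)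
def pvFindBrace : List Char → Option (List Char × List Char)
  | [] => none
  | c :: cs =>
      if c = '}' then some ([c], cs)
      else
        match pvFindBrace cs with
        | some (tok, rest) => some (c :: tok, rest)
        | none => none

theorem pvFindBrace_some (l : List Char) (p : List Char × List Char)
    (h : pvFindBrace l = some p) : l = p.1 ++ p.2 ∧ 0 < p.1.length := by
  induction l generalizing p with
  | nil => simp [pvFindBrace] at h
  | cons c cs ih =>
    unfold pvFindBrace at h
    split at h
    · cases h; simp
    · cases hr : pvFindBrace cs with
      | none => rw [hr] at h; cases h
      | some q =>
        rw [hr] at h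
        cases h
        obtain ⟨hq, hl⟩ := ih q hr
        constructor
        · simpa using hq
        · simp

theorem pvFindBrace_length (l : List Char) (p : List Char × List Char)
    (h : pvFindBrace l = some p) : p.2.length < l.length := by
  obtain ⟨he, hl⟩ := pvFindBrace_some l p h
  subst he; simp; omega

-- the while loop of A, state = (remaining text, current, brace_depth, env_depth, parts)
def A_go (sep : List Char) (multi : Bool) :
    List Char → List Char → Int → Int → List String → List String
  | s, cur, bd, ed, parts =>
    match s with
    | [] =>
        let tail := PySem.Chars.strip cur
        if tail ≠ [] then parts ++ [String.ofList tail] else parts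
    | c :: cs =>
        match hb : (if List.isPrefixOf "\\begin{".toList (c :: cs) then pvFindBrace (List.drop 7 (c :: cs)) else none) with
        | some (tok, rest) =>
            A_go sep multi rest (cur ++ ("\\begin{".toList ++ tok)) bd (ed + 1) parts
        | none =>
          match he : (if List.isPrefixOf "\\end{".toList (c :: cs) then pvFindBrace (List.drop 5 (c :: cs)) else none) with
          | some (tok, rest) =>
              A_go sep multi rest (cur ++ ("\\end{".toList ++ tok)) bd (max 0 (ed - 1)) parts
          | none =>
            if multi then
              if List.isPrefixOf sep (c :: cs) ∧ bd = 0 ∧ ed = 0 then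
                -- index += len(separator); multi ⇒ separator = '\\\\', len 2
                A_go sep multi (List.drop 2 (c :: cs)) [] bd ed (parts ++ [String.ofList (PySem.Chars.strip cur)])
              else
                A_go sep multi cs (cur ++ [c])
                  (if c = '{' then bd + 1 else if c = '}' then max 0 (bd - 1) else bd) ed parts
            else
              if [c] = sep ∧ bd = 0 ∧ ed = 0 then
                A_go sep multi cs [] bd ed (parts ++ [String.ofList (PySem.Chars.strip cur)])
              else
                A_go sep multi cs (cur ++ [c])
                  (if c = '{' then bd + 1 else if c = '}' then max 0 (bd - 1) else bd) ed parts
  termination_by s _ _ _ _ => s.length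
  decreasing_by
  · split at hb
    · have := pvFindBrace_length _ _ hb; simp at this ⊢; omega
    · simp at hb
  · split at he
    · have := pvFindBrace_length _ _ he; simp at this ⊢; omega
    · simp at he
  · simp
  · simp
  · simp
  · simp

def split_top_level_cells_py (text : String) (separator : String) : List String :=
  A_go separator.toList (separator == "\\\\") text.toList [] 0 0 []

-- ===== PORT B =====

-- pass 1 of Source B: scan emitting only the POSITIONS (cuts) of top-level separators;
-- state = (remaining suffix, absolute index i, brace_depth, env_depth)
def C_go (sep : List Char) (multi : Bool) :
    List Char → Nat → Int → Int → List Nat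
  | s, i, bd, ed =>
    match s with
    | [] => []
    | c :: cs =>
        match hb : (if List.isPrefixOf "\\begin{".toList (c :: cs) then pvFindBrace (List.drop 7 (c :: cs)) else none) with
        | some (tok, rest) =>
            C_go sep multi rest (i + 7 + tok.length) bd (max 0 (ed + 1))
        | none =>
          match he : (if List.isPrefixOf "\\end{".toList (c :: cs) then pvFindBrace (List.drop 5 (c :: cs)) else none) with
          | some (tok, rest) =>
              C_go sep multi rest (i + 5 + tok.length) bd (max 0 (ed - 1))
          | none =>
            if (bd = 0 ∧ ed = 0) ∧ (if multi then List.isPrefixOf sep (c :: cs) else [c] = sep) then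
              -- i += step (multi ⇒ separator = '\\\\', len 2)
              i :: C_go sep multi (if multi then List.drop 2 (c :: cs) else cs)
                    (i + (if multi then 2 else 1)) bd ed
            else
              C_go sep multi cs (i + 1)
                (if c = '{' then bd + 1 else if c = '}' then max 0 (bd - 1) else bd) ed
  termination_by s _ _ _ => s.length
  decreasing_by
  · split at hb
    · have := pvFindBrace_length _ _ hb; simp at this ⊢; omega
    · simp at hb
  · split at he
    · have := pvFindBrace_length _ _ he; simp at this ⊢; omega
    · simp at he
  · split <;> simp
  · simp

-- pass 2 of Source B: text[a:b].strip() for consecutive cut bounds; the pairs (a, b) all satisfy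
-- 0 ≤ a and b ≤ len(text), so Python's slice text[a:b] is exactly (drop a).take (b - a)
def split_top_level_cells_py_alt (text : String) (separator : String) : List String :=
  let l := text.toList
  let multi := separator == "\\\\"
  let step : Nat := if multi then 2 else 1
  let n := l.length
  let cuts := C_go separator.toList multi l 0 0 0
  let starts := 0 :: cuts.map (· + step)
  let ends := cuts ++ [n]
  let parts := (starts.zip ends).map
    (fun p => String.ofList (PySem.Chars.strip ((l.drop p.1).take (p.2 - p.1))))
  if parts.getLastD "" = "" then parts.dropLast else parts

-- ===== PRECONDITION & SPEC =====
def Spec_split_top_level_cells_py (text : String) (separator : String) (out : List String) : Prop := out = split_top_level_cells_py_alt text separator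
instance (text : String) (separator : String) (out : List String) : Decidable (Spec_split_top_level_cells_py text separator out) := by unfold Spec_split_top_level_cells_py; infer_instance

-- ===== CLAIM (what is proved, stated in full; the proofs are below) =====
def Claim_equal_split_top_level_cells_py : Prop := ∀ (text : String) (separator : String), Dom_split_top_level_cells_py text separator → Spec_split_top_level_cells_py text separator (split_top_level_cells_py text separator)

-- ===== LEMMAS AND PROOFS =====

-- proof-side intermediate: the raw (unstripped) segments of the split, as a buffer-accumulating
-- scan; it is related to A_go on one side and to the cut/slice construction on the other
def pvEnvToken (s : List Char) : Option (List Char × List Char × Int) :=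
  if List.isPrefixOf "\\begin{".toList s then
    match pvFindBrace (List.drop 7 s) with
    | some (tok, rest) => some ("\\begin{".toList ++ tok, rest, 1)
    | none => none
  else if List.isPrefixOf "\\end{".toList s then
    match pvFindBrace (List.drop 5 s) with
    | some (tok, rest) => some ("\\end{".toList ++ tok, rest, -1)
    | none => none
  else none

theorem pvEnvToken_length (s : List Char) (p : List Char × List Char × Int)
    (h : pvEnvToken s = some p) : p.2.1.length < s.length := by
  unfold pvEnvToken at h
  split at h
  · cases hr : pvFindBrace (List.drop 7 s) with
    | none => rw [hr] at h; cases h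
    | some q =>
        rw [hr] at h; cases h
        have := pvFindBrace_length _ _ hr
        simp at this ⊢; omega
  · split at h
    · cases hr : pvFindBrace (List.drop 5 s) with
      | none => rw [hr] at h; cases h
      | some q =>
          rw [hr] at h; cases h
          have := pvFindBrace_length _ _ hr
          simp at this ⊢; omega
    · cases h

def Seg_go (sep : List Char) (multi : Bool) :
    List Char → List Char → Int → Int → List (List Char) → List (List Char)
  | s, cur, bd, ed, segs =>
    match s with
    | [] => segs ++ [cur]
    | c :: cs =>
        match hr : (if c = '\\' then pvEnvToken (c :: cs) else none) with
        | some (tok, rest, d) =>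
            Seg_go sep multi rest (cur ++ tok) bd (max 0 (ed + d)) segs
        | none =>
            if (bd = 0 ∧ ed = 0) ∧ (if multi then List.isPrefixOf sep (c :: cs) else [c] = sep) then
              Seg_go sep multi (if multi then List.drop 2 (c :: cs) else cs) [] bd ed (segs ++ [cur])
            else
              Seg_go sep multi cs (cur ++ [c])
                (if c = '{' then bd + 1 else if c = '}' then max 0 (bd - 1) else bd) ed segs
  termination_by s _ _ _ _ => s.length
  decreasing_by
  · split at hr
    · have := pvEnvToken_length _ _ hr; simp at this ⊢; omega
    · simp at hr
  · split <;> simp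
  · simp

-- B's post-pass, as a function of the raw segment list
def pvFinalize (segs : List (List Char)) : List String :=
  let parts := segs.map (fun l => String.ofList (PySem.Chars.strip l))
  if parts.getLastD "" = "" then parts.dropLast else parts

theorem Seg_go_ne_nil (sep : List Char) (multi : Bool) (n : Nat) :
    ∀ (s cur : List Char) (bd ed : Int) (segs : List (List Char)),
      s.length ≤ n → Seg_go sep multi s cur bd ed segs ≠ [] := by
  induction n with
  | zero =>
    intro s cur bd ed segs hlen
    have hs : s = [] := by cases s <;> simp_all
    subst hs
    rw [Seg_go]; simp
  | succ n ih =>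
    intro s cur bd ed segs hlen
    cases s with
    | nil => rw [Seg_go]; simp
    | cons c cs =>
      have hcs : cs.length ≤ n := by simp at hlen; omega
      rw [Seg_go]
      split
      · rename_i tok rest d heq
        have hc : c = '\\' := by by_contra h; simp [h] at heq
        have he : pvEnvToken (c :: cs) = some (tok, rest, d) := by simpa [hc] using heq
        have hlt := pvEnvToken_length _ _ he
        exact ih rest (cur ++ tok) bd (max 0 (ed + d)) segs (by simp at hlt ⊢; omega)
      · split
        · split
          · exact ih _ [] bd ed (segs ++ [cur]) (by simp; omega)
          · exact ih cs _ _ ed segs hcs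
        · split
          · exact ih cs [] bd ed (segs ++ [cur]) hcs
          · exact ih cs _ _ ed segs hcs

theorem Seg_go_append (sep : List Char) (multi : Bool) (n : Nat) :
    ∀ (s cur : List Char) (bd ed : Int) (segs : List (List Char)),
      s.length ≤ n →
      Seg_go sep multi s cur bd ed segs = segs ++ Seg_go sep multi s cur bd ed [] := by
  induction n with
  | zero =>
    intro s cur bd ed segs hlen
    have hs : s = [] := by cases s <;> simp_all
    subst hs
    rw [Seg_go, Seg_go]; simp
  | succ n ih =>
    intro s cur bd ed segs hlen
    cases s with
    | nil => rw [Seg_go, Seg_go]; simp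
    | cons c cs =>
      have hcs : cs.length ≤ n := by simp at hlen; omega
      rw [Seg_go, Seg_go]
      split
      · rename_i tok rest d heq
        have hc : c = '\\' := by by_contra h; simp [h] at heq
        have he : pvEnvToken (c :: cs) = some (tok, rest, d) := by simpa [hc] using heq
        have hlt := pvEnvToken_length _ _ he
        exact ih rest (cur ++ tok) bd (max 0 (ed + d)) segs (by simp at hlt ⊢; omega)
      · split
        · split
          · rw [ih _ [] bd ed (segs ++ [cur]) (by simp; omega),
                ih _ [] bd ed ([] ++ [cur]) (by simp; omega)]
            simp
          · exact ih cs _ _ ed segs hcs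
        · split
          · rw [ih cs [] bd ed (segs ++ [cur]) hcs, ih cs [] bd ed ([] ++ [cur]) hcs]
            simp
          · exact ih cs _ _ ed segs hcs

theorem pvFinalize_cons (x : List Char) (r : List (List Char)) (hr : r ≠ []) :
    pvFinalize (x :: r) = String.ofList (PySem.Chars.strip x) :: pvFinalize r := by
  unfold pvFinalize
  have hm : r.map (fun l => String.ofList (PySem.Chars.strip l)) ≠ [] := by simpa using hr
  cases hq : r.map (fun l => String.ofList (PySem.Chars.strip l)) with
  | nil => exact absurd hq hm
  | cons y ys =>
    simp only [List.map_cons, hq, List.getLastD_cons]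
    split <;> simp

theorem pv_base (sep : List Char) (multi : Bool) (cur : List Char) (bd ed : Int)
    (parts : List String) :
    A_go sep multi [] cur bd ed parts = parts ++ pvFinalize (Seg_go sep multi [] cur bd ed []) := by
  rw [A_go, Seg_go]
  unfold pvFinalize
  by_cases h : PySem.Chars.strip cur = [] <;>
    simp [h]

theorem pv_main (sep : List Char) (multi : Bool) (n : Nat) :
    ∀ (s cur : List Char) (bd ed : Int) (parts : List String),
      s.length ≤ n → 0 ≤ ed →
      A_go sep multi s cur bd ed parts = parts ++ pvFinalize (Seg_go sep multi s cur bd ed []) := by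
  induction n with
  | zero =>
    intro s cur bd ed parts hlen _
    have hs : s = [] := by cases s <;> simp_all
    subst hs
    exact pv_base sep multi cur bd ed parts
  | succ n ih =>
    intro s cur bd ed parts hlen hed
    cases s with
    | nil => exact pv_base sep multi cur bd ed parts
    | cons c cs =>
      have hcs : cs.length ≤ n := by simp at hlen; omega
      rw [A_go, Seg_go]
      split
      · -- A takes the \begin{...} branch
        rename_i tok rest heqb
        simp at heqb
        obtain ⟨⟨hc, hpre⟩, hfb⟩ := heqb
        subst hc
        have hlen' : rest.length ≤ n := by
          have := pvFindBrace_length _ _ hfb; simp at this ⊢; omega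
        split
        · rename_i tok' rest' d' heq2
          simp [pvEnvToken, hpre, hfb] at heq2
          obtain ⟨h1, h2, h3⟩ := heq2
          subst h1; subst h2; subst h3
          have hmax : max 0 (ed + 1) = ed + 1 := by omega
          rw [hmax]
          have := ih rest (cur ++ ("\\begin{".toList ++ tok)) bd (ed + 1) parts hlen' (by omega)
          simpa using this
        · rename_i heq2
          simp [pvEnvToken, hpre, hfb] at heq2
      · rename_i heqb
        simp at heqb
        split
        · -- A takes the \end{...} branch
          rename_i tok rest heqe
          simp at heqe
          obtain ⟨⟨hc, hpre⟩, hfe⟩ := heqe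
          subst hc
          have hnb : ¬ ['b', 'e', 'g', 'i', 'n', '{'] <+: cs := by
            intro h
            obtain ⟨t, ht⟩ := hpre
            obtain ⟨t', ht'⟩ := h
            rw [← ht'] at ht
            simp at ht
          have hlen' : rest.length ≤ n := by
            have := pvFindBrace_length _ _ hfe; simp at this ⊢; omega
          split
          · rename_i tok' rest' d' heq2
            simp [pvEnvToken, hnb, hpre, hfe] at heq2
            obtain ⟨h1, h2, h3⟩ := heq2
            subst h1; subst h2; subst h3
            have hmax : max 0 (ed + -1) = max 0 (ed - 1) := by omega
            rw [hmax]
            have := ih rest (cur ++ ("\\end{".toList ++ tok)) bd (max 0 (ed - 1)) parts hlen' (by omega)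
            simpa using this
          · rename_i heq2
            simp [pvEnvToken, hnb, hpre, hfe] at heq2
        · -- no environment token at this position
          rename_i heqe
          simp at heqe
          have hBnone : (if c = '\\' then pvEnvToken (c :: cs) else none) = none := by
            by_cases hc : c = '\\'
            · subst hc
              rw [if_pos rfl]
              simp only [pvEnvToken]
              simp
              split
              · rename_i h
                rw [heqb rfl h]
              · split
                · rename_i _ h
                  rw [heqe rfl h]
                · rfl
            · rw [if_neg hc]
          split
          · -- multi = true
            split
            · rename_i heq2
              split
              · rename_i tok' rest' d' heq3
                rw [hBnone] at heq3
                cases heq3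
              · rw [if_pos (show (bd = 0 ∧ ed = 0) ∧ List.isPrefixOf sep (c :: cs) = true from ⟨⟨heq2.2.1, heq2.2.2⟩, heq2.1⟩)]
                rw [ih _ [] bd ed _ (by simp; omega) hed]
                rw [Seg_go_append sep multi n _ [] bd ed ([] ++ [cur]) (by simp; omega)]
                simp only [List.nil_append, List.singleton_append]
                rw [pvFinalize_cons _ _ (Seg_go_ne_nil sep multi n _ [] bd ed [] (by simp; omega))]
                simp
            · rename_i heq2
              generalize (if c = '{' then bd + 1 else if c = '}' then max 0 (bd - 1) else bd) = bd'
              rw [ih cs (cur ++ [c]) bd' ed parts hcs hed]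
              split
              · rename_i tok' rest' d' heq3
                rw [hBnone] at heq3
                cases heq3
              · rw [if_neg (fun hQ => heq2 ⟨hQ.2, hQ.1.1, hQ.1.2⟩)]
          · -- multi = false
            split
            · rename_i heq2
              split
              · rename_i tok' rest' d' heq3
                rw [hBnone] at heq3
                cases heq3
              · rw [if_pos (show (bd = 0 ∧ ed = 0) ∧ decide ([c] = sep) = true from ⟨⟨heq2.2.1, heq2.2.2⟩, decide_eq_true heq2.1⟩)]
                rw [ih cs [] bd ed _ hcs hed]
                rw [Seg_go_append sep multi n cs [] bd ed ([] ++ [cur]) hcs]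
                simp only [List.nil_append, List.singleton_append]
                rw [pvFinalize_cons _ _ (Seg_go_ne_nil sep multi n cs [] bd ed [] hcs)]
                simp
            · rename_i heq2
              generalize (if c = '{' then bd + 1 else if c = '}' then max 0 (bd - 1) else bd) = bd'
              rw [ih cs (cur ++ [c]) bd' ed parts hcs hed]
              split
              · rename_i tok' rest' d' heq3
                rw [hBnone] at heq3
                cases heq3
              · rw [if_neg (fun hQ => heq2 ⟨of_decide_eq_true hQ.2, hQ.1.1, hQ.1.2⟩)]

-- the raw segments determined by a list of cut positions, slicing l from position a on
def cutSegs (step : Nat) (l : List Char) : Nat → List Nat → List (List Char)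
  | a, [] => [l.drop a]
  | a, c :: cs => (l.drop a).take (c - a) :: cutSegs step l (c + step) cs

def consHead (cur : List Char) : List (List Char) → List (List Char)
  | [] => [cur]
  | x :: xs => (cur ++ x) :: xs

theorem cutSegs_ne_nil (step : Nat) (l : List Char) (a : Nat) (cs : List Nat) :
    cutSegs step l a cs ≠ [] := by
  cases cs <;> simp [cutSegs]

theorem consHead_nil (xs : List (List Char)) (h : xs ≠ []) : consHead [] xs = xs := by
  cases xs with
  | nil => exact absurd rfl h
  | cons x xs => simp [consHead]

-- every cut emitted by C_go lies at or after the current index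
theorem C_go_lb (sep : List Char) (multi : Bool) (n : Nat) :
    ∀ (s : List Char) (i : Nat) (bd ed : Int) (c' : Nat),
      s.length ≤ n → c' ∈ C_go sep multi s i bd ed → i ≤ c' := by
  induction n with
  | zero =>
    intro s i bd ed c' hlen hmem
    have hs : s = [] := by cases s <;> simp_all
    subst hs
    rw [C_go] at hmem; simp at hmem
  | succ n ih =>
    intro s i bd ed c' hlen hmem
    cases s with
    | nil => rw [C_go] at hmem; simp at hmem
    | cons c cs =>
      have hcs : cs.length ≤ n := by simp at hlen; omega
      rw [C_go] at hmem
      split at hmem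
      · rename_i tok rest heq
        have hl : rest.length ≤ n := by
          split at heq
          · have := pvFindBrace_length _ _ heq; simp at this ⊢; omega
          · cases heq
        have := ih rest (i + 7 + tok.length) _ _ c' hl hmem
        omega
      · split at hmem
        · rename_i tok rest heq
          have hl : rest.length ≤ n := by
            split at heq
            · have := pvFindBrace_length _ _ heq; simp at this ⊢; omega
            · cases heq
          have := ih rest (i + 5 + tok.length) _ _ c' hl hmem
          omega
        · split at hmem
          · split at hmem
            · simp at hmem
              rcases hmem with h | h
              · omega
              · have := ih _ (i + 2) _ _ c' (by simp; omega) h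
                omega
            · have := ih cs (i + 1) _ _ c' hcs hmem
              omega
          · split at hmem
            · simp at hmem
              rcases hmem with h | h
              · omega
              · have := ih cs (i + 1) _ _ c' hcs h
                omega
            · have := ih cs (i + 1) _ _ c' hcs hmem
              omega

-- shifting the head segment: if the text from i starts with tok and the cuts are ≥ i + |tok|,
-- prefixing tok to cur is the same as starting the head slice |tok| earlier
theorem consHead_shift (step : Nat) (l : List Char) (cur tok : List Char) (i i' : Nat)
    (h : l.drop i = tok ++ l.drop i') (hi : i' = i + tok.length)
    (cuts : List Nat) (hlb : ∀ c ∈ cuts, i' ≤ c) :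
    consHead cur (cutSegs step l i cuts) = consHead (cur ++ tok) (cutSegs step l i' cuts) := by
  cases cuts with
  | nil => simp [cutSegs, consHead, h]
  | cons c cs =>
    have hc : i' ≤ c := hlb c (by simp)
    have : c - i = tok.length + (c - i') := by omega
    simp only [cutSegs, consHead]
    rw [h, this, List.take_append]
    simp

theorem pv_seg (sep : List Char) (multi : Bool) (l : List Char) (n : Nat) :
    ∀ (s cur : List Char) (bd ed : Int) (segs : List (List Char)) (i : Nat),
      s.length ≤ n → s = l.drop i →
      Seg_go sep multi s cur bd ed segs =
        segs ++ consHead cur (cutSegs (if multi then 2 else 1) l i (C_go sep multi s i bd ed)) := by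
  induction n with
  | zero =>
    intro s cur bd ed segs i hlen hdrop
    have hs : s = [] := List.eq_nil_of_length_eq_zero (Nat.le_zero.mp hlen)
    subst hs
    rw [Seg_go, C_go]
    simp [cutSegs, consHead, ← hdrop]
  | succ n ih =>
    intro s cur bd ed segs i hlen hdrop
    cases s with
    | nil => rw [Seg_go, C_go]; simp [cutSegs, consHead, ← hdrop]
    | cons c cs =>
      have hcs : cs.length ≤ n := by simp at hlen; omega
      have hlit : "\\begin{".toList = ['\\', 'b', 'e', 'g', 'i', 'n', '{'] := by decide
      have hlit2 : "\\end{".toList = ['\\', 'e', 'n', 'd', '{'] := by decide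
      rw [Seg_go]
      split
      · -- Seg_go consumed an environment token
        rename_i tok rest d heq
        have hc : c = '\\' := by by_contra h; simp [h] at heq
        have he : pvEnvToken (c :: cs) = some (tok, rest, d) := by simpa [hc] using heq
        unfold pvEnvToken at he
        split at he
        · -- \begin{...}
          rename_i hpre
          cases hfb : pvFindBrace (List.drop 7 (c :: cs)) with
          | none => rw [hfb] at he; cases he
          | some q =>
            obtain ⟨tk, rst⟩ := q
            rw [hfb] at he
            simp at he
            obtain ⟨h1, h2, h3⟩ := he
            subst h1; subst h2; subst h3
            have hC : C_go sep multi (c :: cs) i bd ed =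
                C_go sep multi rst (i + 7 + tk.length) bd (max 0 (ed + 1)) := by
              rw [C_go, if_pos hpre, hfb]
            rw [hC]
            obtain ⟨t, ht⟩ := List.isPrefixOf_iff_prefix.mp hpre
            have ht7 : List.drop 7 (c :: cs) = t := by
              rw [← ht]; exact List.drop_left' (by decide)
            rw [ht7] at hfb
            have htq : t = tk ++ rst := (pvFindBrace_some _ _ hfb).1
            have hsplit : l.drop i = ('\\' :: 'b' :: 'e' :: 'g' :: 'i' :: 'n' :: '{' :: tk) ++ rst := by
              rw [← hdrop, ← ht, htq, hlit]; simp
            have hdrop' : rst = l.drop (i + 7 + tk.length) := by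
              have h0 : (l.drop i).drop (7 + tk.length) = rst := by
                rw [hsplit]
                exact List.drop_left' (by simp; try omega)
              rw [List.drop_drop] at h0
              have hidx : i + (7 + tk.length) = i + 7 + tk.length := by omega
              rw [hidx] at h0
              exact h0.symm
            have hlen' : rst.length ≤ n := by
              have := pvFindBrace_length _ _ hfb
              have hteq : t.length = tk.length + rst.length := by rw [htq]; simp
              have htlen : t.length ≤ cs.length - 6 := by
                rw [← ht7]; simp; try omega
              simp at hcs ⊢
              omega
            rw [ih rst (cur ++ ('\\' :: 'b' :: 'e' :: 'g' :: 'i' :: 'n' :: '{' :: tk)) bd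
                (max 0 (ed + 1)) segs (i + 7 + tk.length) hlen' hdrop']
            congr 1
            exact (consHead_shift (if multi = true then 2 else 1) l cur
              ('\\' :: 'b' :: 'e' :: 'g' :: 'i' :: 'n' :: '{' :: tk) i (i + 7 + tk.length)
              (by rw [hsplit, ← hdrop']) (by simp; omega)
              (C_go sep multi rst (i + 7 + tk.length) bd (max 0 (ed + 1)))
              (fun c' hc' => C_go_lb sep multi rst.length rst (i + 7 + tk.length) bd
                (max 0 (ed + 1)) c' le_rfl hc')).symm
        · rename_i hnb
          split at he
          · -- \end{...}
            rename_i hpre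
            cases hfe : pvFindBrace (List.drop 5 (c :: cs)) with
            | none => rw [hfe] at he; cases he
            | some q =>
              obtain ⟨tk, rst⟩ := q
              rw [hfe] at he
              simp at he
              obtain ⟨h1, h2, h3⟩ := he
              subst h1; subst h2; subst h3
              have hmaxeq : max 0 (ed + -1) = max 0 (ed - 1) := by omega
              rw [hmaxeq]
              have hC : C_go sep multi (c :: cs) i bd ed =
                  C_go sep multi rst (i + 5 + tk.length) bd (max 0 (ed - 1)) := by
                rw [C_go, if_neg hnb, if_pos hpre, hfe]
              rw [hC]
              obtain ⟨t, ht⟩ := List.isPrefixOf_iff_prefix.mp hpre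
              have ht5 : List.drop 5 (c :: cs) = t := by
                rw [← ht]; exact List.drop_left' (by decide)
              rw [ht5] at hfe
              have htq : t = tk ++ rst := (pvFindBrace_some _ _ hfe).1
              have hsplit : l.drop i = ('\\' :: 'e' :: 'n' :: 'd' :: '{' :: tk) ++ rst := by
                rw [← hdrop, ← ht, htq, hlit2]; simp
              have hdrop' : rst = l.drop (i + 5 + tk.length) := by
                have h0 : (l.drop i).drop (5 + tk.length) = rst := by
                  rw [hsplit]
                  exact List.drop_left' (by simp; try omega)
                rw [List.drop_drop] at h0
                have hidx : i + (5 + tk.length) = i + 5 + tk.length := by omega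
                rw [hidx] at h0
                exact h0.symm
              have hlen' : rst.length ≤ n := by
                have := pvFindBrace_length _ _ hfe
                have hteq : t.length = tk.length + rst.length := by rw [htq]; simp
                have htlen : t.length ≤ cs.length - 4 := by
                  rw [← ht5]; simp; try omega
                simp at hcs ⊢
                omega
              rw [ih rst (cur ++ ('\\' :: 'e' :: 'n' :: 'd' :: '{' :: tk)) bd
                  (max 0 (ed - 1)) segs (i + 5 + tk.length) hlen' hdrop']
              congr 1
              exact (consHead_shift (if multi = true then 2 else 1) l cur
                ('\\' :: 'e' :: 'n' :: 'd' :: '{' :: tk) i (i + 5 + tk.length)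
                (by rw [hsplit, ← hdrop']) (by simp; omega)
                (C_go sep multi rst (i + 5 + tk.length) bd (max 0 (ed - 1)))
                (fun c' hc' => C_go_lb sep multi rst.length rst (i + 5 + tk.length) bd
                  (max 0 (ed - 1)) c' le_rfl hc')).symm
          · cases he
      · -- no environment token at this position
        rename_i heqn
        have hbn : (if "\\begin{".toList.isPrefixOf (c :: cs) = true
            then pvFindBrace (List.drop 7 (c :: cs)) else none) = none := by
          by_cases hp : "\\begin{".toList.isPrefixOf (c :: cs) = true
          · rw [if_pos hp]
            obtain ⟨t, ht⟩ := List.isPrefixOf_iff_prefix.mp hp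
            rw [hlit] at ht
            have hc : c = '\\' := (List.cons_eq_cons.mp ht).1.symm
            rw [if_pos hc] at heqn
            unfold pvEnvToken at heqn
            rw [if_pos hp] at heqn
            cases hfb : pvFindBrace (List.drop 7 (c :: cs)) with
            | none => rfl
            | some q => rw [hfb] at heqn; simp at heqn
          · rw [if_neg hp]
        have hen : (if "\\end{".toList.isPrefixOf (c :: cs) = true
            then pvFindBrace (List.drop 5 (c :: cs)) else none) = none := by
          by_cases hp : "\\end{".toList.isPrefixOf (c :: cs) = true
          · rw [if_pos hp]
            obtain ⟨t, ht⟩ := List.isPrefixOf_iff_prefix.mp hp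
            rw [hlit2] at ht
            have hc : c = '\\' := (List.cons_eq_cons.mp ht).1.symm
            have hcs2 : cs = 'e' :: 'n' :: 'd' :: '{' :: t := by
              have := (List.cons_eq_cons.mp ht).2
              simpa using this.symm
            have hnb : ¬ ("\\begin{".toList.isPrefixOf (c :: cs) = true) := by
              rw [hlit]
              intro hbp
              obtain ⟨t', ht'⟩ := List.isPrefixOf_iff_prefix.mp hbp
              rw [hcs2] at ht'
              simp at ht'
            rw [if_pos hc] at heqn
            unfold pvEnvToken at heqn
            rw [if_neg hnb, if_pos hp] at heqn
            cases hfe : pvFindBrace (List.drop 5 (c :: cs)) with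
            | none => rfl
            | some q => rw [hfe] at heqn; simp at heqn
          · rw [if_neg hp]
        have hC : C_go sep multi (c :: cs) i bd ed =
            (if (bd = 0 ∧ ed = 0) ∧ (if multi = true then sep.isPrefixOf (c :: cs)
                else decide ([c] = sep)) = true then
              i :: C_go sep multi (if multi = true then List.drop 2 (c :: cs) else cs)
                (i + if multi = true then 2 else 1) bd ed
            else C_go sep multi cs (i + 1)
              (if c = '{' then bd + 1 else if c = '}' then max 0 (bd - 1) else bd) ed) := by
          rw [C_go, hbn, hen]
        rw [hC]
        have hd1 : cs = l.drop (i + 1) := by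
          have h1 : (l.drop i).drop 1 = l.drop (i + 1) := by rw [List.drop_drop]
          rw [← hdrop] at h1
          simpa using h1
        have hd2 : List.drop 2 (c :: cs) = l.drop (i + 2) := by
          have h2 : (l.drop i).drop 2 = l.drop (i + 2) := by rw [List.drop_drop]
          rw [← hdrop] at h2
          exact h2
        split
        · -- multi = true
          rename_i hm
          split
          · -- top-level separator: a cut at position i
            rw [ih (List.drop 2 (c :: cs)) [] bd ed (segs ++ [cur]) (i + 2)
                (by simp; omega) hd2]
            rw [if_pos hm]
            rw [consHead_nil _ (cutSegs_ne_nil _ _ _ _)]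
            simp [cutSegs, consHead]
          · -- ordinary character
            rw [ih cs (cur ++ [c])
                (if c = '{' then bd + 1 else if c = '}' then max 0 (bd - 1) else bd) ed segs
                (i + 1) hcs hd1]
            rw [if_pos hm]
            congr 1
            exact (consHead_shift 2 l cur [c] i (i + 1)
              (by rw [← hdrop, hd1]; rfl) (by simp)
              (C_go sep multi cs (i + 1)
                (if c = '{' then bd + 1 else if c = '}' then max 0 (bd - 1) else bd) ed)
              (fun c' hc' => C_go_lb sep multi cs.length cs (i + 1)
                (if c = '{' then bd + 1 else if c = '}' then max 0 (bd - 1) else bd) ed c'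
                le_rfl hc')).symm
        · -- multi = false
          rename_i hm
          split
          · -- top-level separator: a cut at position i
            rw [ih cs [] bd ed (segs ++ [cur]) (i + 1) hcs hd1]
            rw [if_neg hm]
            rw [consHead_nil _ (cutSegs_ne_nil _ _ _ _)]
            simp [cutSegs, consHead]
          · -- ordinary character
            rw [ih cs (cur ++ [c])
                (if c = '{' then bd + 1 else if c = '}' then max 0 (bd - 1) else bd) ed segs
                (i + 1) hcs hd1]
            rw [if_neg hm]
            congr 1
            exact (consHead_shift 1 l cur [c] i (i + 1)
              (by rw [← hdrop, hd1]; rfl) (by simp)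
              (C_go sep multi cs (i + 1)
                (if c = '{' then bd + 1 else if c = '}' then max 0 (bd - 1) else bd) ed)
              (fun c' hc' => C_go_lb sep multi cs.length cs (i + 1)
                (if c = '{' then bd + 1 else if c = '}' then max 0 (bd - 1) else bd) ed c'
                le_rfl hc')).symm


theorem pv_zip (step : Nat) (l : List Char) :
    ∀ (cuts : List Nat) (a : Nat),
      ((a :: cuts.map (· + step)).zip (cuts ++ [l.length])).map
        (fun p => String.ofList (PySem.Chars.strip ((l.drop p.1).take (p.2 - p.1)))) =
      (cutSegs step l a cuts).map (fun x => String.ofList (PySem.Chars.strip x)) := by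
  intro cuts
  induction cuts with
  | nil =>
    intro a
    have : (l.drop a).take (l.length - a) = l.drop a := by
      apply List.take_of_length_le
      simp
    simp [cutSegs, this]
  | cons c cs ih =>
    intro a
    simp only [List.map_cons, List.cons_append, List.zip_cons_cons, cutSegs]
    rw [← ih (c + step)]

-- ===== VERDICT (by name: the statement is the Claim_ definition above) =====
theorem split_top_level_cells_py_spec : Claim_equal_split_top_level_cells_py := by
  intro text separator _
  unfold Spec_split_top_level_cells_py split_top_level_cells_py split_top_level_cells_py_alt
  have h1 := pv_main separator.toList (separator == "\\\\") text.toList.length text.toList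
    [] 0 0 [] le_rfl le_rfl
  have h2 := pv_seg separator.toList (separator == "\\\\") text.toList text.toList.length
    text.toList [] 0 0 [] 0 le_rfl (by simp)
  have h3 := pv_zip (if (separator == "\\\\") then 2 else 1) text.toList
    (C_go separator.toList (separator == "\\\\") text.toList 0 0 0) 0
  rw [h1, h2]
  rw [consHead_nil _ (cutSegs_ne_nil _ _ _ _)]
  simp only [List.nil_append, pvFinalize, h3]
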